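-- pv_equiv track=rewrite | github.com/hanghae99-Algorithm-study-12/study | 강전호/1주차/시험/프로그래머스_기능개발.py | solution
-- ===== SOURCE A (Python) =====
-- import math
--
-- def solution(progresses, speeds):
--     maintain = []
--     for i in range(0, len(progresses)):
--         maintain.append(math.ceil((100 - progresses[i]) / speeds[i]))
--
--     answer = []
--     temp = maintain[0]
--     cnt = 0
--     for i in maintain:
--         if temp >= i:
--             cnt += 1
--
--         else:
--             answer.append(cnt)
--             cnt = 1
--             temp = i
--     answer.append(cnt)
--
--     return answer
-- ===== SOURCE B (Python) =====
-- import math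
-- from itertools import accumulate
--
-- def solution(progresses, speeds):
--     days = [math.ceil((100 - progresses[i]) / speeds[i]) for i in range(len(progresses))]
--     n = len(days)
--     prefmax = list(accumulate(days, max))
--     starts = [i for i in range(n) if i == 0 or prefmax[i - 1] < days[i]]
--     return [b - a for a, b in zip(starts, starts[1:] + [n])]
-- ===== Notes on version B (the rewrite author's own statement) =====
-- stated objective: alternative
-- what changed: Replaces A's stateful temp/cnt accumulator loop with a staged record-based pipeline: compute the running-maximum list (itertools.accumulate with max), take as group boundaries exactly the indices where the value exceeds every previous one (new prefix-max record), and return the differences of consecutive boundary indices; no grouping state is carried through any loop.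
import Mathlib
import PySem

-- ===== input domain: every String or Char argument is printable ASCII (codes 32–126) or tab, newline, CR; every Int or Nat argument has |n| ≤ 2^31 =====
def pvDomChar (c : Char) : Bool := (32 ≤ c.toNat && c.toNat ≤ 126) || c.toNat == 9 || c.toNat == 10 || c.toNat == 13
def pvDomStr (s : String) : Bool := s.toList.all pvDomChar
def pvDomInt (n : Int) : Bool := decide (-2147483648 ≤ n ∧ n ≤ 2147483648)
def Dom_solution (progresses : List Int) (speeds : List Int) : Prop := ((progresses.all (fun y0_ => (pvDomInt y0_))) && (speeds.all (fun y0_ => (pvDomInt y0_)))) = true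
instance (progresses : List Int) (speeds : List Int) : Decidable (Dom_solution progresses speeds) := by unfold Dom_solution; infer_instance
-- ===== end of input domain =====

-- B replaces A's temp/cnt accumulator loop with a staged record pipeline (running-maximum list,
-- boundary indices = new prefix-max records, differences of consecutive boundaries); same O(n) cost.
-- math.ceil((100-p)/s) is ported as the exact integer ceiling -((-a)//s): on the |n| ≤ 2^31 domain
-- the float quotient's ceiling equals the exact one.

-- ===== PORT A =====
def solution (progresses : List Int) (speeds : List Int) : List Int :=
  let maintain := (PySem.List.pyRange 0 progresses.length 1).foldl
    (fun acc i => acc ++ [-(PySem.Int.floordiv (-(100 - PySem.List.pyGetD progresses i 0)) (PySem.List.pyGetD speeds i 0))]) []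
  let s := maintain.foldl
    (fun (s : List Int × Int × Int) i =>
      if s.2.1 ≥ i then (s.1, s.2.1, s.2.2 + 1)
      else (s.1 ++ [s.2.2], i, 1))
    ([], PySem.List.pyGetD maintain 0 0, 0)
  s.1 ++ [s.2.2]

-- ===== PORT B =====
-- itertools.accumulate(days, max): accMax/accGo is its structural transliteration
def accGo (m : Int) : List Int → List Int
  | [] => []
  | y :: ys => (max m y) :: accGo (max m y) ys

def accMax : List Int → List Int
  | [] => []
  | x :: xs => x :: accGo x xs

def solution_alt (progresses : List Int) (speeds : List Int) : List Int :=
  let days := (PySem.List.pyRange 0 progresses.length 1).map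
    (fun i => -(PySem.Int.floordiv (-(100 - PySem.List.pyGetD progresses i 0)) (PySem.List.pyGetD speeds i 0)))
  let n : Int := days.length
  let prefmax := accMax days
  let starts := (PySem.List.pyRange 0 n 1).filter
    (fun i => decide (i = 0) || decide (PySem.List.pyGetD prefmax (i - 1) 0 < PySem.List.pyGetD days i 0))
  (starts.zip (PySem.List.slice starts (some 1) none ++ [n])).map (fun p => p.2 - p.1)

-- ===== PRECONDITION & SPEC =====
-- Pre_ excludes exactly the inputs where A raises: empty progresses (IndexError on maintain[0]),
-- speeds shorter than progresses (IndexError), and a zero speed among the used ones (ZeroDivisionError).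
def Pre_solution (progresses : List Int) (speeds : List Int) : Prop :=
  progresses ≠ [] ∧ progresses.length ≤ speeds.length ∧
    ∀ x ∈ speeds.take progresses.length, x ≠ 0
instance (progresses : List Int) (speeds : List Int) : Decidable (Pre_solution progresses speeds) := by
  unfold Pre_solution; infer_instance

def pvWitness_solution : List Int × List Int := ([30, 99, 95], [1, 1, 1])

def Spec_solution (progresses : List Int) (speeds : List Int) (out : List Int) : Prop := out = solution_alt progresses speeds
instance (progresses : List Int) (speeds : List Int) (out : List Int) : Decidable (Spec_solution progresses speeds out) := by unfold Spec_solution; infer_instance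

-- ===== CLAIM (what is proved, stated in full; the proofs are below) =====
def Claim_equal_solution : Prop := ∀ (progresses : List Int) (speeds : List Int), Dom_solution progresses speeds → Pre_solution progresses speeds → Spec_solution progresses speeds (solution progresses speeds)
-- ===== LEMMAS AND PROOFS =====

-- common grouping spec: leader x, then everything ≤ x joins its group
def g : List Int → List Int
  | [] => []
  | x :: xs =>
      (1 + ((xs.takeWhile (fun y => decide (y ≤ x))).length : Int)) ::
        g (xs.dropWhile (fun y => decide (y ≤ x)))
termination_by l => l.length
decreasing_by
  have := List.length_dropWhile_le (fun y => decide (y ≤ x)) xs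
  simp only [List.length_cons]
  omega

-- A's accumulator recursion, extracted
def groups : Int → Int → List Int → List Int
  | _, c, [] => [c]
  | t, c, x :: xs => if t ≥ x then groups t (c + 1) xs else c :: groups x 1 xs

lemma A_fold (l : List Int) : ∀ (t c : Int) (ans : List Int),
    (let s := l.foldl
      (fun (s : List Int × Int × Int) i =>
        if s.2.1 ≥ i then (s.1, s.2.1, s.2.2 + 1)
        else (s.1 ++ [s.2.2], i, 1)) (ans, t, c)
     s.1 ++ [s.2.2]) = ans ++ groups t c l := by
  induction l with
  | nil => intro t c ans; simp [groups]
  | cons x xs ih =>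
      intro t c ans
      simp only [List.foldl_cons, groups]
      by_cases h : t ≥ x
      · simp only [h, if_pos]
        exact ih t (c + 1) ans
      · simp only [h, ite_false]
        rw [ih x 1 (ans ++ [c])]
        simp

lemma groups_eq (l : List Int) : ∀ (t c : Int),
    groups t c l
      = (c + ((l.takeWhile (fun y => decide (y ≤ t))).length : Int)) ::
          g (l.dropWhile (fun y => decide (y ≤ t))) := by
  induction l with
  | nil => intro t c; simp [groups, g]
  | cons x xs ih =>
      intro t c
      by_cases h : x ≤ t
      · have ht : t ≥ x := h
        rw [List.takeWhile_cons_of_pos (by simpa using h),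
            List.dropWhile_cons_of_pos (by simpa using h)]
        simp only [groups, ht, if_pos, List.length_cons]
        rw [ih t (c + 1)]
        congr 1
        push_cast
        ring
      · have ht : ¬ t ≥ x := h
        rw [List.takeWhile_cons_of_neg (by simpa using h),
            List.dropWhile_cons_of_neg (by simpa using h)]
        simp only [groups, ht, ite_false, List.length_nil]
        rw [ih x 1]
        simp [g]

-- A's second phase on a nonempty days list equals g
lemma phase2_eq_g (days : List Int) (hdne : days ≠ []) :
    (let s := days.foldl
      (fun (s : List Int × Int × Int) i =>
        if s.2.1 ≥ i then (s.1, s.2.1, s.2.2 + 1)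
        else (s.1 ++ [s.2.2], i, 1))
      ([], PySem.List.pyGetD days 0 0, 0)
     s.1 ++ [s.2.2]) = g days := by
  obtain ⟨x, xs, hcons⟩ := List.exists_cons_of_ne_nil hdne
  subst hcons
  have h0 : PySem.List.pyGetD (x :: xs) 0 0 = x := by
    simp [PySem.List.pyGetD_zero]
  rw [h0]
  have hA := A_fold (x :: xs) x 0 []
  simp only [List.nil_append] at hA
  rw [hA]
  have hx : x ≥ x := le_refl x
  simp only [groups, hx, if_pos]
  rw [show (0 : Int) + 1 = 1 by ring, groups_eq xs x 1, g]

-- ===== B-side: Nat-level form of the record pipeline =====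

def isS (l : List Int) (j : Nat) : Bool :=
  (j == 0) || decide ((accMax l).getD (j - 1) 0 < l.getD j 0)

def startsN (l : List Int) : List Nat := (List.range l.length).filter (isS l)

def diffs (s : List Nat) (n : Nat) : List Int :=
  (s.zip (s.drop 1 ++ [n])).map (fun p => (p.2 : Int) - (p.1 : Int))

lemma accGo_all_le (x : Int) (w : List Int) (h : ∀ y ∈ w, y ≤ x) (d : List Int) :
    accGo x (w ++ d) = w.map (fun _ => x) ++ accGo x d := by
  induction w with
  | nil => simp
  | cons y ys ih =>
      have hy : y ≤ x := h y (by simp)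
      simp only [List.cons_append, accGo, max_eq_left hy, List.map_cons]
      rw [ih (fun z hz => h z (by simp [hz]))]

lemma accGo_eq_accMax (x z : Int) (ds : List Int) (h : x < z) :
    accGo x (z :: ds) = accMax (z :: ds) := by
  simp [accGo, accMax, max_eq_right h.le]

lemma dropWhile_cons_prop {p : Int → Bool} : ∀ (xs : List Int) {z : Int} {ds : List Int},
    xs.dropWhile p = z :: ds → p z = false := by
  intro xs
  induction xs with
  | nil => intro z ds h; simp [List.dropWhile] at h
  | cons a t ih =>
      intro z ds h
      by_cases hp : p a = true
      · rw [List.dropWhile_cons_of_pos hp] at h; exact ih h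
      · rw [List.dropWhile_cons_of_neg hp] at h
        injection h with h1 h2
        subst h1
        simpa using hp

lemma getD_append_right' (l l' : List Int) (j : Nat) :
    (l ++ l').getD (l.length + j) 0 = l'.getD j 0 := by
  simp [List.getD_eq_getElem?_getD, List.getElem?_append_right (by omega : l.length ≤ l.length + j)]

lemma prefix_getD (x : Int) (w t : List Int) (j : Nat) (hj : j ≤ w.length) :
    (x :: (w.map (fun _ => x) ++ t)).getD j 0 = x := by
  cases j with
  | zero => rfl
  | succ j' =>
      have hj' : j' < w.length := by omega
      rw [List.getD_cons_succ, List.getD_append _ _ _ _ (by simpa using hj')]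
      simp [List.getD_eq_getElem?_getD, hj']

lemma getD_mid (x : Int) (u t : List Int) (m : Nat) (hm : u.length = m) (j : Nat) :
    (x :: (u ++ t)).getD (m + 1 + j) 0 = t.getD j 0 := by
  subst hm
  rw [show u.length + 1 + j = (u.length + j) + 1 by omega, List.getD_cons_succ,
    getD_append_right']

lemma startsN_cons (x : Int) (xs : List Int) :
    startsN (x :: xs)
      = 0 :: (startsN (xs.dropWhile (fun y => decide (y ≤ x)))).map
          (· + ((xs.takeWhile (fun y => decide (y ≤ x))).length + 1)) := by
  have hxs : xs.takeWhile (fun y => decide (y ≤ x)) ++ xs.dropWhile (fun y => decide (y ≤ x)) = xs :=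
    List.takeWhile_append_dropWhile
  set w := xs.takeWhile (fun y => decide (y ≤ x)) with hwdef
  set d := xs.dropWhile (fun y => decide (y ≤ x)) with hddef
  have hw : ∀ y ∈ w, y ≤ x := fun y hy => by simpa using List.mem_takeWhile_imp hy
  have hacc : accMax (x :: xs) = x :: (w.map (fun _ => x) ++ accGo x d) := by
    simp only [accMax]
    conv_lhs => rw [← hxs]
    rw [accGo_all_le x w hw d]
  have hlen : (x :: xs).length = (w.length + 1) + d.length := by
    have := congrArg List.length hxs
    rw [List.length_append] at this
    simp only [List.length_cons]
    omega
  unfold startsN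
  rw [hlen, List.range_add, List.filter_append, List.range_succ_eq_map,
    List.filter_cons_of_pos (by simp [isS]), List.filter_map, List.filter_map]
  have hA : (List.range w.length).filter (isS (x :: xs) ∘ Nat.succ) = [] := by
    rw [List.filter_eq_nil_iff]
    intro j hj
    have hj' : j < w.length := List.mem_range.mp hj
    have h1 : (accMax (x :: xs)).getD (j + 1 - 1) 0 = x := by
      rw [hacc, show j + 1 - 1 = j from rfl]
      exact prefix_getD x w _ j (by omega)
    have h2 : (x :: xs).getD (j + 1) 0 = w.getD j 0 := by
      conv_lhs => rw [← hxs]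
      rw [List.getD_cons_succ, List.getD_append _ _ _ _ hj']
    have h3 : w.getD j 0 ≤ x := by
      rw [List.getD_eq_getElem w 0 hj']
      exact hw _ (List.getElem_mem hj')
    simp only [Function.comp, isS, Nat.succ_eq_add_one, h1, h2, Bool.or_eq_true, beq_iff_eq,
      decide_eq_true_eq, not_or]
    exact ⟨by omega, by omega⟩
  rw [hA]
  simp only [List.map_nil]
  have hB : ∀ j ∈ List.range d.length,
      (isS (x :: xs) ∘ (fun y => w.length + 1 + y)) j = isS d j := by
    intro j hj
    have hj' : j < d.length := List.mem_range.mp hj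
    have hdne : d ≠ [] := by intro h; rw [h] at hj'; simp at hj'
    obtain ⟨z, ds, hzds⟩ := List.exists_cons_of_ne_nil hdne
    have hz : x < z := by
      have hf := dropWhile_cons_prop xs (hddef.symm.trans hzds)
      simp at hf
      exact hf
    cases j with
    | zero =>
        have h1 : (accMax (x :: xs)).getD (w.length + 1 + 0 - 1) 0 = x := by
          rw [hacc, show w.length + 1 + 0 - 1 = w.length from by omega]
          exact prefix_getD x w _ w.length le_rfl
        have h2 : (x :: xs).getD (w.length + 1 + 0) 0 = z := by
          conv_lhs => rw [← hxs]
          rw [getD_mid x w d w.length rfl 0, hzds]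
          rfl
        simp only [Function.comp, isS, h1, h2]
        simp [hz]
    | succ j' =>
        have h1 : (accMax (x :: xs)).getD (w.length + 1 + (j' + 1) - 1) 0
            = (accMax d).getD j' 0 := by
          rw [hacc, show w.length + 1 + (j' + 1) - 1 = w.length + 1 + j' from by omega,
            getD_mid x (w.map (fun _ => x)) _ w.length (by simp) j',
            hzds, accGo_eq_accMax x z ds hz]
        have h2 : (x :: xs).getD (w.length + 1 + (j' + 1)) 0 = d.getD (j' + 1) 0 := by
          conv_lhs => rw [← hxs]
          exact getD_mid x w d w.length rfl (j' + 1)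
        simp only [Function.comp, isS, h1, h2]
        simp
  rw [List.filter_congr hB, List.singleton_append]
  congr 1
  apply List.map_congr_left
  intro j _
  omega

lemma diffs_cons_cons (a b : Nat) (t : List Nat) (n : Nat) :
    diffs (a :: b :: t) n = ((b : Int) - a) :: diffs (b :: t) n := by
  simp [diffs]

lemma diffs_single (a n : Nat) : diffs [a] n = [(n : Int) - a] := by simp [diffs]

lemma diffs_map_add (s : List Nat) (k n : Nat) (hk : k ≤ n) :
    diffs (s.map (· + k)) n = diffs s (n - k) := by
  induction s with
  | nil => simp [diffs]
  | cons a t ih =>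
      cases t with
      | nil =>
          simp only [List.map_cons, List.map_nil, diffs_single]
          have : ((n - k : Nat) : Int) = (n : Int) - k := by omega
          rw [this]; push_cast; ring_nf
      | cons b r =>
          simp only [List.map_cons] at ih ⊢
          rw [diffs_cons_cons, diffs_cons_cons, ih]
          congr 1
          push_cast; ring

lemma B_eq_g (l : List Int) : diffs (startsN l) l.length = g l := by
  fun_induction g l with
  | case1 => simp [startsN, diffs]
  | case2 x xs ih =>
      rw [startsN_cons]
      have hxs := List.takeWhile_append_dropWhile (p := fun y => decide (y ≤ x)) (l := xs)
      have hlen : xs.length = (xs.takeWhile (fun y => decide (y ≤ x))).length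
          + (xs.dropWhile (fun y => decide (y ≤ x))).length := by
        have := congrArg List.length hxs
        rw [List.length_append] at this
        omega
      cases hd : xs.dropWhile (fun y => decide (y ≤ x)) with
      | nil =>
          rw [hd] at ih hlen
          simp only [startsN, List.length_nil, List.range_zero, List.filter_nil, List.map_nil,
            diffs_single]
          simp only [g, Nat.cast_zero, Nat.add_zero, List.length_cons, List.length_nil] at hlen ⊢
          congr 1
          push_cast
          omega
      | cons z ds =>
          rw [hd] at ih hlen
          obtain ⟨R, hR⟩ : ∃ R, startsN (z :: ds) = 0 :: R := ⟨_, startsN_cons z ds⟩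
          have hkn : (xs.takeWhile (fun y => decide (y ≤ x))).length + 1 ≤ (x :: xs).length := by
            simp only [List.length_cons]; omega
          have hsub : (x :: xs).length - ((xs.takeWhile (fun y => decide (y ≤ x))).length + 1)
              = (z :: ds).length := by
            simp only [List.length_cons] at *; omega
          rw [hR]
          simp only [List.map_cons, Nat.zero_add]
          rw [diffs_cons_cons,
            show ((xs.takeWhile (fun y => decide (y ≤ x))).length + 1) :: R.map (· + ((xs.takeWhile (fun y => decide (y ≤ x))).length + 1))
              = (0 :: R).map (· + ((xs.takeWhile (fun y => decide (y ≤ x))).length + 1)) from by simp,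
            ← hR, diffs_map_add _ _ _ hkn, hsub, ih]
          congr 1
          push_cast
          ring

lemma alt_eq_diffs (days : List Int) :
    (let n : Int := days.length
     let prefmax := accMax days
     let starts := (PySem.List.pyRange 0 n 1).filter
       (fun i => decide (i = 0) || decide (PySem.List.pyGetD prefmax (i - 1) 0 < PySem.List.pyGetD days i 0))
     (starts.zip (PySem.List.slice starts (some 1) none ++ [n])).map (fun p => p.2 - p.1))
      = diffs (startsN days) days.length := by
  dsimp only
  rw [PySem.List.pyRange_zero_nat, List.filter_map]
  have hc : (List.range days.length).filter
      ((fun i => decide (i = (0:Int)) || decide (PySem.List.pyGetD (accMax days) (i - 1) 0 < PySem.List.pyGetD days i 0)) ∘ (fun k : Nat => (k : Int)))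
      = startsN days := by
    unfold startsN
    apply List.filter_congr
    intro j _
    cases j with
    | zero => simp [isS]
    | succ j' =>
        simp only [Function.comp]
        have h1 : ((j' + 1 : Nat) : Int) - 1 = ((j' : Nat) : Int) := by push_cast; ring
        rw [h1, PySem.List.pyGetD_natCast, PySem.List.pyGetD_natCast]
        simp [isS]
        intro h
        exfalso
        omega
  rw [hc, PySem.List.slice_from_one, ← List.drop_one, ← List.map_drop,
    show [(days.length : Int)] = [days.length].map (fun k : Nat => (k : Int)) from rfl,
    ← List.map_append, List.zip_map, List.map_map]
  simp [diffs, Function.comp, Prod.map]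

-- ===== VERDICT (by name: the statement is the Claim_ definition above) =====
theorem solution_spec : Claim_equal_solution := by
  intro progresses speeds _hdom hpre
  obtain ⟨hne, -, -⟩ := hpre
  unfold Spec_solution solution solution_alt
  rw [PySem.List.foldl_append_singleton_eq_map]
  simp only [List.nil_append]
  rw [alt_eq_diffs, B_eq_g]
  apply phase2_eq_g
  intro hnil
  apply hne
  have hlen := congrArg List.length hnil
  simp only [List.length_map, PySem.List.length_pyRange_one, List.length_nil] at hlen
  exact List.length_eq_zero_iff.mp (by omega)
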